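-- pv_equiv track=rewrite | github.com/Cedesc/SimplePythonApplications | spotifyV2/logic/merging/mergePlaylists.py | _arrange_elements_for_three_playlists
-- ===== SOURCE A (Python) =====
-- def _arrange_elements_for_three_playlists(list1: list[str], list2: list[str], list3: list[str]) -> list[str]:
--     """
--     Merges three lists two one.
--
--     Example:
--         list1 = [ 1 , 2 , 3 ] \n
--         list2 = [ first , second , third ] \n
--         list3 = [ one , two , three ] \n
--         result = [ 1 , first , one , 2 , second , two , 3 , third , three ]
--
--     Raises:
--         Exception: If the lists haven't the same length
--     """
--     length: int = len(list1)
--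
--     # check if the length of the lists is equal
--     if length != len(list2) or length != len(list3):
--         raise Exception("Lists are not the same length.")
--
--     return [list1[i // 3] if i % 3 == 0
--             else (list2[i // 3] if i % 3 == 1
--             else list3[i // 3])
--             for i in range(length * 3)]
-- ===== SOURCE B (Python) =====
-- def _arrange_elements_for_three_playlists(list1: list[str], list2: list[str], list3: list[str]) -> list[str]:
--     if len(list1) != len(list2) or len(list1) != len(list3):
--         raise Exception("Lists are not the same length.")
--     return [x for triple in zip(list1, list2, list3) for x in triple]
-- ===== Notes on version B (the rewrite author's own statement) =====
-- stated objective: idiomatic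
-- what changed: Replaces the index-arithmetic comprehension over range(3*len) with i//3 and i%3 branching by a flatten over zip(list1, list2, list3), iterating grouped triples directly.
import Mathlib
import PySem

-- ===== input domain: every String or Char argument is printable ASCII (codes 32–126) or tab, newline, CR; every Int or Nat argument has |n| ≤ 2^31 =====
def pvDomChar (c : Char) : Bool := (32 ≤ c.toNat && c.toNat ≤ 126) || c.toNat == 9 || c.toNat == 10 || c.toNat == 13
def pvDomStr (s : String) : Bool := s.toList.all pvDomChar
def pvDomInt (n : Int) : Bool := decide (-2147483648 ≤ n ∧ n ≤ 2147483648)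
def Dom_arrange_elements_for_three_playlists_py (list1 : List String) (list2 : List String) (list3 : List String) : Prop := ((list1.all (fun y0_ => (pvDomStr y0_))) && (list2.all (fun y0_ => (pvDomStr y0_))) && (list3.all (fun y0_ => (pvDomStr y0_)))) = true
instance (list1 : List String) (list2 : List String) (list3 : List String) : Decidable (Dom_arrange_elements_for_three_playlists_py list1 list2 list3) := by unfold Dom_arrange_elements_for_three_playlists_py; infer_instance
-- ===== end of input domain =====

-- B interleaves by flattening zipped triples instead of A's range(3n) comprehension with i//3 / i%3 branching (idiomatic; return-value equivalence proved; on unequal lengths both Pythons raise, excluded by Pre_).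

-- ===== PORT A =====
-- the comprehension body of A, as a named helper (i // 3 and i % 3 via PySem; list[i] via pyGetD, exact under Pre_)
def pvBody3 (list1 : List String) (list2 : List String) (list3 : List String) (i : Int) : String :=
  if PySem.Int.mod i 3 = 0 then PySem.List.pyGetD list1 (PySem.Int.floordiv i 3) ""
  else if PySem.Int.mod i 3 = 1 then PySem.List.pyGetD list2 (PySem.Int.floordiv i 3) ""
  else PySem.List.pyGetD list3 (PySem.Int.floordiv i 3) ""

def arrange_elements_for_three_playlists_py (list1 : List String) (list2 : List String) (list3 : List String) : List String :=
  let length : Int := list1.length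
  if length ≠ (list2.length : Int) ∨ length ≠ (list3.length : Int) then []  -- Python raises here; excluded by Pre_
  else (PySem.List.pyRange 0 (length * 3) 1).map (pvBody3 list1 list2 list3)

-- ===== PORT B =====
def arrange_elements_for_three_playlists_py_alt (list1 : List String) (list2 : List String) (list3 : List String) : List String :=
  if (list1.length : Int) ≠ (list2.length : Int) ∨ (list1.length : Int) ≠ (list3.length : Int) then []  -- Python raises here; excluded by Pre_
  else (list1.zip (list2.zip list3)).flatMap (fun t => [t.1, t.2.1, t.2.2])

-- ===== PRECONDITION & SPEC =====
-- Pre_ excludes exactly the inputs with unequal lengths, on which both Pythons raise Exception.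
def Pre_arrange_elements_for_three_playlists_py (list1 : List String) (list2 : List String) (list3 : List String) : Prop :=
  list1.length = list2.length ∧ list1.length = list3.length
instance (list1 : List String) (list2 : List String) (list3 : List String) : Decidable (Pre_arrange_elements_for_three_playlists_py list1 list2 list3) := by unfold Pre_arrange_elements_for_three_playlists_py; infer_instance
def pvWitness_arrange_elements_for_three_playlists_py : List String × List String × List String :=
  (["1", "2"], ["first", "second"], ["one", "two"])
def Spec_arrange_elements_for_three_playlists_py (list1 : List String) (list2 : List String) (list3 : List String) (out : List String) : Prop := out = arrange_elements_for_three_playlists_py_alt list1 list2 list3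
instance (list1 : List String) (list2 : List String) (list3 : List String) (out : List String) : Decidable (Spec_arrange_elements_for_three_playlists_py list1 list2 list3 out) := by unfold Spec_arrange_elements_for_three_playlists_py; infer_instance

-- ===== CLAIM (what is proved, stated in full; the proofs are below) =====
def Claim_equal_arrange_elements_for_three_playlists_py : Prop := ∀ (list1 : List String) (list2 : List String) (list3 : List String), Dom_arrange_elements_for_three_playlists_py list1 list2 list3 → Pre_arrange_elements_for_three_playlists_py list1 list2 list3 → Spec_arrange_elements_for_three_playlists_py list1 list2 list3 (arrange_elements_for_three_playlists_py list1 list2 list3)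

-- ===== LEMMAS AND PROOFS =====

lemma pvGetD_succ_cons (x : String) (xs : List String) (q : Int) (hq : 0 ≤ q) (d : String) :
    PySem.List.pyGetD (x :: xs) (q + 1) d = PySem.List.pyGetD xs q d := by
  obtain ⟨n, rfl⟩ := Int.eq_ofNat_of_zero_le hq
  have h : ((n : Int) + 1) = ((n + 1 : Nat) : Int) := by push_cast; ring
  rw [h, PySem.List.pyGetD_natCast, PySem.List.pyGetD_natCast, List.getD_cons_succ]

lemma pvBody3_shift (a b c : String) (t1 t2 t3 : List String) (k : Nat) :
    pvBody3 (a :: t1) (b :: t2) (c :: t3) (3 + (k : Int)) = pvBody3 t1 t2 t3 (k : Int) := by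
  unfold pvBody3
  simp only [PySem.Int.mod_eq_emod_of_pos (by norm_num : (0:Int) < 3),
      PySem.Int.floordiv_eq_ediv_of_pos (by norm_num : (0:Int) < 3)]
  have hm : (3 + (k : Int)) % 3 = (k : Int) % 3 := by omega
  have hd : (3 + (k : Int)) / 3 = (k : Int) / 3 + 1 := by omega
  have hq : 0 ≤ (k : Int) / 3 := by positivity
  rw [hm, hd, pvGetD_succ_cons _ _ _ hq, pvGetD_succ_cons _ _ _ hq, pvGetD_succ_cons _ _ _ hq]

lemma pvKey : ∀ (l1 l2 l3 : List String), l2.length = l1.length → l3.length = l1.length →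
    (List.range (l1.length * 3)).map (fun (k : Nat) => pvBody3 l1 l2 l3 (↑k : Int))
      = (l1.zip (l2.zip l3)).flatMap (fun t => [t.1, t.2.1, t.2.2]) := by
  intro l1
  induction l1 with
  | nil =>
    intro l2 l3 h2 h3
    simp at h2 h3
    simp [h2, h3]
  | cons a t1 ih =>
    intro l2 l3 h2 h3
    cases l2 with
    | nil => simp at h2
    | cons b t2 =>
      cases l3 with
      | nil => simp at h3
      | cons c t3 =>
        simp only [List.length_cons] at h2 h3 ⊢
        have hlen : (t1.length + 1) * 3 = 3 + t1.length * 3 := by ring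
        rw [hlen, List.range_add, List.map_append, List.map_map]
        have h123 : (List.range 3).map (fun (k : Nat) => pvBody3 (a :: t1) (b :: t2) (c :: t3) (↑k : Int))
            = [a, b, c] := by
          have e0 : pvBody3 (a :: t1) (b :: t2) (c :: t3) (0 : Int) = a := by
            simp [pvBody3, PySem.List.pyGetD_zero_cons]
          have e1 : pvBody3 (a :: t1) (b :: t2) (c :: t3) (1 : Int) = b := by
            simp [pvBody3, PySem.List.pyGetD_zero_cons]
          have e2 : pvBody3 (a :: t1) (b :: t2) (c :: t3) (2 : Int) = c := by
            simp [pvBody3, PySem.List.pyGetD_zero_cons]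
          simp [List.range_succ, e0, e1, e2]
        have hshift : (fun k : Nat => pvBody3 (a :: t1) (b :: t2) (c :: t3) (((3 + k : Nat) : Int)))
            = fun k : Nat => pvBody3 t1 t2 t3 (↑k : Int) := by
          funext k
          have : ((3 + k : Nat) : Int) = 3 + (k : Int) := by push_cast; ring
          rw [this, pvBody3_shift]
        rw [h123]
        simp only [Function.comp_def]
        rw [hshift, ih t2 t3 (by omega) (by omega)]
        simp

-- ===== VERDICT (by name: the statement is the Claim_ definition above) =====
theorem arrange_elements_for_three_playlists_py_spec : Claim_equal_arrange_elements_for_three_playlists_py := by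
  intro list1 list2 list3 _ hpre
  obtain ⟨h2, h3⟩ := hpre
  unfold Spec_arrange_elements_for_three_playlists_py
  have hg : ¬ (((list1.length : Int) ≠ (list2.length : Int)) ∨ ((list1.length : Int) ≠ (list3.length : Int))) := by
    rintro (h | h) <;> exact h (by exact_mod_cast (by assumption : list1.length = _))
  simp only [arrange_elements_for_three_playlists_py, arrange_elements_for_three_playlists_py_alt,
    if_neg hg]
  rw [PySem.List.pyRange_one]
  have ht : ((list1.length : Int) * 3 - 0).toNat = list1.length * 3 := by omega
  rw [ht, List.map_map]
  have hf : ((pvBody3 list1 list2 list3) ∘ fun k : Nat => (0 : Int) + (k : Int))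
      = fun (k : Nat) => pvBody3 list1 list2 list3 (↑k : Int) := by
    funext k; simp
  rw [hf, pvKey list1 list2 list3 h2.symm h3.symm]
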